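-- pv_equiv track=rewrite | github.com/ashishiit/workspace | BinarySearchTrees/uc_test2.py | String_Solution
-- ===== SOURCE A (Python) =====
-- def String_Solution(string_list, n):
--     temp = {}
--     for i in string_list:
--         if i not in temp:
--             temp[i] = string_list.count(i)
--     result = []
--     for i in temp:
--         if temp[i] == n:
--             result.append(i)
--     return result
-- ===== SOURCE B (Python) =====
-- def String_Solution(string_list, n):
--     # sort a copy, scan runs of equal strings to find which strings occur exactly n times,
--     # then one pass over the original list keeps first occurrences of qualifying strings
--     qual = set()
--     prev = None
--     run_len = 0
--     for x in sorted(string_list):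
--         if run_len > 0 and prev == x:
--             run_len += 1
--         else:
--             if run_len == n and run_len > 0:
--                 qual.add(prev)
--             prev = x
--             run_len = 1
--     if run_len == n and run_len > 0:
--         qual.add(prev)
--     result = []
--     seen = set()
--     for x in string_list:
--         if x not in seen:
--             if x in qual:
--                 result.append(x)
--             seen.add(x)
--     return result
-- ===== Notes on version B (the rewrite author's own statement) =====
-- stated objective: faster
-- what changed: Replaces the per-distinct-element string_list.count() scan (quadratic) by sorting a copy and reading each string's multiplicity off run-lengths of consecutive equal elements, then one seen-set pass over the original list to keep first occurrences of qualifying strings.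
import Mathlib
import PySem

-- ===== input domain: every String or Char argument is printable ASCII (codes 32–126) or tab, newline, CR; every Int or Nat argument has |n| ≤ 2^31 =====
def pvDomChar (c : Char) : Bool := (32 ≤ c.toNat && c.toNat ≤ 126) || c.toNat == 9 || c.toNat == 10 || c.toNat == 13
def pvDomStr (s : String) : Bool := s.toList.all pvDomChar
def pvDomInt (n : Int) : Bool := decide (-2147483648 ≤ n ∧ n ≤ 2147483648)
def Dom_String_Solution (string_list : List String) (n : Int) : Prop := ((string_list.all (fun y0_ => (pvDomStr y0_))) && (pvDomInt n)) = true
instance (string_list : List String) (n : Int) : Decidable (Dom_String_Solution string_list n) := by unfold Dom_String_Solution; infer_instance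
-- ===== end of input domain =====

-- B replaces A's per-distinct-element string_list.count() scan by sorting a copy and reading
-- multiplicities off run-lengths, plus one seen-set pass keeping first occurrences (faster).


-- ===== PORT A =====
def String_Solution (string_list : List String) (n : Int) : List String :=
  let temp : PySem.Dict String Int :=
    string_list.foldl
      (fun d i =>
        if d.contains i = false then
          d.insert i ((PySem.List.count string_list i : Nat) : Int)
        else d)
      PySem.Dict.empty
  -- 'for i in temp' iterates the keys; 'temp[i]' is an existing-key lookup (getD's default is never used)
  temp.keys.foldl (fun result i => if temp.getD i 0 = n then result ++ [i] else result) []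

-- ===== PORT B =====
-- 'if run_len == n and run_len > 0: qual.add(prev)'; prev is Optional (None before the first run,
-- and then run_len = 0 makes the guard false, so the none branch is never the one adding)
def pvRunAdd (q : PySem.Set String) (prev : Option String) (runLen n : Int) : PySem.Set String :=
  if runLen = n ∧ 0 < runLen then
    match prev with
    | some p => PySem.Set.add q p
    | none => q
  else q

-- loop body of 'for x in sorted(string_list)': state (qual, prev, run_len)
def pvRunStep (n : Int) (st : PySem.Set String × Option String × Int) (x : String) :
    PySem.Set String × Option String × Int :=
  if 0 < st.2.2 ∧ st.2.1 = some x then (st.1, st.2.1, st.2.2 + 1)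
  else (pvRunAdd st.1 st.2.1 st.2.2 n, some x, 1)

-- loop body of 'for x in string_list': state (result, seen)
def pvFirstStep (qual : PySem.Set String) (acc : List String × PySem.Set String) (x : String) :
    List String × PySem.Set String :=
  if acc.2.contains x then acc
  else ((if qual.contains x then acc.1 ++ [x] else acc.1), PySem.Set.add acc.2 x)

def String_Solution_alt (string_list : List String) (n : Int) : List String :=
  let st := (PySem.List.sorted string_list (fun x => x)).foldl (pvRunStep n)
              (PySem.Set.empty, none, 0)
  let qual := pvRunAdd st.1 st.2.1 st.2.2 n
  (string_list.foldl (pvFirstStep qual) ([], PySem.Set.empty)).1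

-- ===== PRECONDITION & SPEC =====
def Spec_String_Solution (string_list : List String) (n : Int) (out : List String) : Prop := out = String_Solution_alt string_list n
instance (string_list : List String) (n : Int) (out : List String) : Decidable (Spec_String_Solution string_list n out) := by unfold Spec_String_Solution; infer_instance

-- ===== CLAIM (what is proved, stated in full; the proofs are below) =====
def Claim_equal_String_Solution : Prop := ∀ (string_list : List String) (n : Int), Dom_String_Solution string_list n → Spec_String_Solution string_list n (String_Solution string_list n)

-- ===== LEMMAS AND PROOFS =====

lemma pvCount_eq (xs : List String) (v : String) : PySem.List.count xs v = xs.count v := rfl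

-- ---- A's side: the dict loop builds (first-occurrence keys, full-list counts) ----
lemma pvTempItems (sl : List String) :
    ∀ (l : List String) (d : PySem.Dict String Int) (S : PySem.Set String),
      d.items = S.map (fun k => (k, ((PySem.List.count sl k : Nat) : Int))) →
      ((l.foldl
        (fun d i =>
          if d.contains i = false then
            d.insert i ((PySem.List.count sl i : Nat) : Int)
          else d) d)).items
        = (PySem.Set.update S l).map (fun k => (k, ((PySem.List.count sl k : Nat) : Int))) := by
  intro l
  induction l with
  | nil => intro d S h; simpa using h
  | cons x t ih =>
    intro d S h
    have hkeys : d.keys = S := by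
      show d.items.map (·.1) = S
      rw [h, List.map_map]
      simp [Function.comp_def]
    rw [List.foldl_cons]
    rw [show PySem.Set.update S (x :: t) = PySem.Set.update (PySem.Set.add S x) t from rfl]
    by_cases hx : x ∈ S
    · have hc : d.contains x = true :=
        (PySem.Dict.contains_iff_mem_keys d x).2 (by rw [hkeys]; exact hx)
      have hadd : PySem.Set.add S x = S := by simp [PySem.Set.add, hx]
      rw [if_neg (show ¬(d.contains x = false) by simp [hc]), hadd]
      exact ih d S h
    · have hc : d.contains x = false := by
        rw [Bool.eq_false_iff]
        intro hcc
        exact hx (by rw [← hkeys]; exact (PySem.Dict.contains_iff_mem_keys d x).1 hcc)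
      have hadd : PySem.Set.add S x = S ++ [x] := by simp [PySem.Set.add, hx]
      rw [if_pos hc, hadd]
      refine ih _ _ ?_
      rw [PySem.Dict.items_insert_of_not_contains d _ hc, h, List.map_append]
      rfl

lemma pvA_keys_filter (sl : List String) (n : Int) (temp : PySem.Dict String Int)
    (hitems : temp.items
      = (PySem.Set.ofList sl).map (fun k => (k, ((PySem.List.count sl k : Nat) : Int)))) :
    temp.keys.foldl (fun result i => if temp.getD i 0 = n then result ++ [i] else result) []
      = (PySem.Set.ofList sl).filter
          (fun k => decide (((PySem.List.count sl k : Nat) : Int) = n)) := by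
  have hkeys : temp.keys = PySem.Set.ofList sl := by
    show temp.items.map (·.1) = _
    rw [hitems, List.map_map]
    simp [Function.comp_def]
  have hnodup : temp.keys.Nodup := by rw [hkeys]; exact PySem.Set.nodup_ofList sl
  have hget : ∀ i ∈ temp.keys, temp.getD i 0 = ((PySem.List.count sl i : Nat) : Int) := by
    intro i hi
    refine PySem.Dict.getD_of_mem_items temp ?_ hnodup 0
    rw [hitems]
    exact List.mem_map.2 ⟨i, hkeys ▸ hi, rfl⟩
  rw [PySem.List.foldl_congr_mem temp.keys _
        (fun result i => if ((PySem.List.count sl i : Nat) : Int) = n then result ++ [i] else result) []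
        (by intro acc x hx; rw [hget x hx])]
  rw [PySem.List.foldl_append_ite_eq_filter
        (fun i => ((PySem.List.count sl i : Nat) : Int) = n) temp.keys []]
  rw [hkeys, List.nil_append]

lemma pvA_eq_filter (sl : List String) (n : Int) :
    String_Solution sl n
      = (PySem.Set.ofList sl).filter
          (fun k => decide (((PySem.List.count sl k : Nat) : Int) = n)) := by
  exact pvA_keys_filter sl n _
    (by rw [pvTempItems sl sl PySem.Dict.empty [] rfl]; rfl)

-- ---- B's side: the run scan over the sorted list computes counts ----
def pvQualOf (st : PySem.Set String × Option String × Int) (n : Int) : PySem.Set String :=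
  pvRunAdd st.1 st.2.1 st.2.2 n

def pvQual (sl : List String) (n : Int) : PySem.Set String :=
  pvQualOf ((PySem.List.sorted sl (fun x => x)).foldl (pvRunStep n)
              (PySem.Set.empty, none, 0)) n

lemma pvRunAddMem (q : PySem.Set String) (v : String) (rl n : Int) (hrl : 0 < rl) (z : String) :
    z ∈ pvRunAdd q (some v) rl n ↔ z ∈ q ∨ (z = v ∧ rl = n) := by
  by_cases hn : rl = n
  · have h : pvRunAdd q (some v) rl n = PySem.Set.add q v := by
      unfold pvRunAdd; rw [if_pos ⟨hn, hrl⟩]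
    rw [h, PySem.Set.mem_add]
    tauto
  · have h : pvRunAdd q (some v) rl n = q := by
      unfold pvRunAdd; rw [if_neg (by tauto)]
    rw [h]
    tauto

lemma pvRunMem (n : Int) :
    ∀ (l : List String) (q : PySem.Set String) (v : String) (rl : Int),
      List.Pairwise (· ≤ ·) l → (∀ y ∈ l, v ≤ y) → 0 < rl →
      ∀ z,
        z ∈ pvQualOf (l.foldl (pvRunStep n) (q, some v, rl)) n ↔
          z ∈ q ∨ (z = v ∧ rl + (l.count v : Int) = n) ∨
            (z ∈ l ∧ z ≠ v ∧ ((l.count z : Nat) : Int) = n) := by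
  intro l
  induction l with
  | nil =>
    intro q v rl _ _ hrl z
    rw [List.foldl_nil]
    rw [show pvQualOf (q, some v, rl) n = pvRunAdd q (some v) rl n from rfl]
    rw [pvRunAddMem q v rl n hrl z]
    constructor
    · rintro (h | ⟨h1, h2⟩)
      · exact Or.inl h
      · exact Or.inr (Or.inl ⟨h1, by simp; omega⟩)
    · rintro (h | ⟨h1, h2⟩ | ⟨h, -⟩)
      · exact Or.inl h
      · refine Or.inr ⟨h1, ?_⟩
        simp at h2; omega
      · simp at h
  | cons x t ih =>
    intro q v rl hpw hle hrl z
    have hpt : List.Pairwise (· ≤ ·) t := hpw.tail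
    have hxt : ∀ y ∈ t, x ≤ y := fun y hy => List.rel_of_pairwise_cons hpw hy
    by_cases hv : v = x
    · subst hv
      have hstep : pvRunStep n (q, some v, rl) v = (q, some v, rl + 1) := by
        simp [pvRunStep, hrl]
      rw [List.foldl_cons, hstep,
          ih q v (rl + 1) hpt (fun y hy => hle y (List.mem_cons_of_mem v hy)) (by omega) z]
      have hcv : (((v :: t).count v : Nat) : Int) = (t.count v : Int) + 1 := by
        rw [List.count_cons_self]; push_cast; ring
      constructor
      · rintro (h | ⟨h1, h2⟩ | ⟨h1, h2, h3⟩)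
        · exact Or.inl h
        · exact Or.inr (Or.inl ⟨h1, by rw [hcv]; omega⟩)
        · refine Or.inr (Or.inr ⟨List.mem_cons_of_mem v h1, h2, ?_⟩)
          rwa [List.count_cons_of_ne (Ne.symm h2)]
      · rintro (h | ⟨h1, h2⟩ | ⟨h1, h2, h3⟩)
        · exact Or.inl h
        · exact Or.inr (Or.inl ⟨h1, by rw [hcv] at h2; omega⟩)
        · refine Or.inr (Or.inr ⟨?_, h2, ?_⟩)
          · rcases List.mem_cons.1 h1 with he | ht
            · exact absurd he h2
            · exact ht
          · rwa [List.count_cons_of_ne (Ne.symm h2)] at h3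
    · have hvx : v < x := lt_of_le_of_ne (hle x List.mem_cons_self) hv
      have hvnot : ∀ y ∈ x :: t, v ≠ y := by
        intro y hy
        rcases List.mem_cons.1 hy with he | ht
        · exact he ▸ ne_of_lt hvx
        · exact ne_of_lt (lt_of_lt_of_le hvx (hxt y ht))
      have hstep : pvRunStep n (q, some v, rl) x = (pvRunAdd q (some v) rl n, some x, 1) := by
        simp [pvRunStep, hv]
      rw [List.foldl_cons, hstep, ih (pvRunAdd q (some v) rl n) x 1 hpt hxt (by omega) z]
      have hvnm : v ∉ x :: t := fun hm => hvnot v hm rfl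
      have hcl : (x :: t).count v = 0 := List.count_eq_zero.2 hvnm
      have hcx : (((x :: t).count x : Nat) : Int) = (t.count x : Int) + 1 := by
        rw [List.count_cons_self]; push_cast; ring
      constructor
      · rintro (hq' | ⟨h1, h2⟩ | ⟨h1, h2, h3⟩)
        · rcases (pvRunAddMem q v rl n hrl z).1 hq' with h | ⟨h1, h2⟩
          · exact Or.inl h
          · refine Or.inr (Or.inl ⟨h1, ?_⟩)
            rw [hcl]; push_cast; omega
        · subst h1
          refine Or.inr (Or.inr ⟨List.mem_cons_self,
            Ne.symm (hvnot z List.mem_cons_self), ?_⟩)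
          rw [hcx]; omega
        · refine Or.inr (Or.inr ⟨List.mem_cons_of_mem x h1,
            Ne.symm (hvnot z (List.mem_cons_of_mem x h1)), ?_⟩)
          rwa [List.count_cons_of_ne (Ne.symm h2)]
      · rintro (hq | ⟨h1, h2⟩ | ⟨h1, h2, h3⟩)
        · exact Or.inl ((pvRunAddMem q v rl n hrl z).2 (Or.inl hq))
        · refine Or.inl ((pvRunAddMem q v rl n hrl z).2 (Or.inr ⟨h1, ?_⟩))
          rw [hcl] at h2; push_cast at h2; omega
        · by_cases hzx : z = x
          · subst hzx
            refine Or.inr (Or.inl ⟨rfl, ?_⟩)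
            rw [hcx] at h3; omega
          · refine Or.inr (Or.inr ⟨?_, hzx, ?_⟩)
            · rcases List.mem_cons.1 h1 with he | ht
              · exact absurd he hzx
              · exact ht
            · rwa [List.count_cons_of_ne (Ne.symm hzx)] at h3

lemma pvQualMem (sl : List String) (n : Int) (z : String) :
    z ∈ pvQual sl n ↔ z ∈ sl ∧ ((sl.count z : Nat) : Int) = n := by
  unfold pvQual
  have hperm : (PySem.List.sorted sl (fun x => x)).Perm sl :=
    PySem.List.sorted_perm sl (fun x => x) false
  have hpw : List.Pairwise (· ≤ ·) (PySem.List.sorted sl (fun x => x)) := by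
    simpa using PySem.List.sorted_pairwise sl (fun x => x)
  rcases hs : PySem.List.sorted sl (fun x => x) with _ | ⟨x, t⟩
  · have hnil : sl = [] := (PySem.List.sorted_eq_nil_iff sl (fun x => x) false).1 hs
    subst hnil
    simp [pvQualOf, pvRunAdd]
  · rw [hs] at hpw hperm
    have hstep : pvRunStep n (PySem.Set.empty, none, 0) x = (PySem.Set.empty, some x, 1) := by
      simp [pvRunStep, pvRunAdd]
    rw [List.foldl_cons, hstep,
        pvRunMem n t PySem.Set.empty x 1 hpw.tail
          (fun y hy => List.rel_of_pairwise_cons hpw hy) (by omega) z]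
    rw [← hperm.mem_iff, ← hperm.count_eq]
    have hemp : z ∉ (PySem.Set.empty : PySem.Set String) := by simp [PySem.Set.empty]
    constructor
    · rintro (h | ⟨h1, h2⟩ | ⟨h1, h2, h3⟩)
      · exact absurd h hemp
      · subst h1
        refine ⟨List.mem_cons_self, ?_⟩
        rw [List.count_cons_self]; push_cast; omega
      · refine ⟨List.mem_cons_of_mem x h1, ?_⟩
        rwa [List.count_cons_of_ne (Ne.symm h2)]
    · rintro ⟨h1, h2⟩
      by_cases hzx : z = x
      · subst hzx
        rw [List.count_cons_self] at h2; push_cast at h2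
        exact Or.inr (Or.inl ⟨rfl, by omega⟩)
      · rcases List.mem_cons.1 h1 with he | ht
        · exact absurd he hzx
        · refine Or.inr (Or.inr ⟨ht, hzx, ?_⟩)
          rwa [List.count_cons_of_ne (Ne.symm hzx)] at h2

-- ---- B's side: the first-occurrence pass is a filter of the ordered dedup ----
def pvFirsts (seen : PySem.Set String) : List String → List String
  | [] => []
  | x :: t => if seen.contains x then pvFirsts seen t
              else x :: pvFirsts (PySem.Set.add seen x) t

lemma pvFoldFirst (qual : PySem.Set String) :
    ∀ (l : List String) (res : List String) (seen : PySem.Set String),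
      (l.foldl (pvFirstStep qual) (res, seen)).1
        = res ++ (pvFirsts seen l).filter (fun x => qual.contains x) := by
  intro l
  induction l with
  | nil => intro res seen; simp [pvFirsts]
  | cons x t ih =>
    intro res seen
    by_cases hc : seen.contains x
    · have hstep : pvFirstStep qual (res, seen) x = (res, seen) := by
        show (if seen.contains x then (res, seen)
              else ((if qual.contains x then res ++ [x] else res), PySem.Set.add seen x)) = _
        rw [if_pos hc]
      have hfirst : pvFirsts seen (x :: t) = pvFirsts seen t := by
        show (if seen.contains x then pvFirsts seen t
              else x :: pvFirsts (PySem.Set.add seen x) t) = _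
        rw [if_pos hc]
      rw [List.foldl_cons, hstep, ih res seen, hfirst]
    · have hstep : pvFirstStep qual (res, seen) x
          = ((if qual.contains x then res ++ [x] else res), PySem.Set.add seen x) := by
        show (if seen.contains x then (res, seen)
              else ((if qual.contains x then res ++ [x] else res), PySem.Set.add seen x)) = _
        rw [if_neg hc]
      have hfirst : pvFirsts seen (x :: t) = x :: pvFirsts (PySem.Set.add seen x) t := by
        show (if seen.contains x then pvFirsts seen t
              else x :: pvFirsts (PySem.Set.add seen x) t) = _
        rw [if_neg hc]
      rw [List.foldl_cons, hstep, ih _ _, hfirst, List.filter_cons]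
      by_cases hq : x ∈ qual
      · simp [hq, List.append_assoc]
      · simp [hq]

lemma pvFirstsUpdate : ∀ (l : List String) (seen : PySem.Set String),
    PySem.Set.update seen l = seen ++ pvFirsts seen l := by
  intro l
  induction l with
  | nil => intro seen; simp [pvFirsts]
  | cons x t ih =>
    intro seen
    show PySem.Set.update (PySem.Set.add seen x) t = _
    by_cases hc : seen.contains x
    · have hmem : x ∈ seen := List.contains_iff_mem.1 hc
      have hadd : PySem.Set.add seen x = seen := by simp [PySem.Set.add, hmem]
      have hfirst : pvFirsts seen (x :: t) = pvFirsts seen t := by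
        show (if seen.contains x then pvFirsts seen t
              else x :: pvFirsts (PySem.Set.add seen x) t) = _
        rw [if_pos hc]
      rw [hadd, ih seen, hfirst]
    · have hmem : x ∉ seen := fun hm => hc (List.contains_iff_mem.2 hm)
      have hadd : PySem.Set.add seen x = seen ++ [x] := by simp [PySem.Set.add, hmem]
      have hfirst : pvFirsts seen (x :: t) = x :: pvFirsts (PySem.Set.add seen x) t := by
        show (if seen.contains x then pvFirsts seen t
              else x :: pvFirsts (PySem.Set.add seen x) t) = _
        rw [if_neg hc]
      rw [hadd, ih (seen ++ [x]), hfirst, hadd, List.append_assoc]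
      rfl

lemma pvB_main (sl : List String) (n : Int) (qual : PySem.Set String)
    (hq : ∀ z, z ∈ qual ↔ z ∈ sl ∧ ((sl.count z : Nat) : Int) = n) :
    (sl.foldl (pvFirstStep qual) ([], PySem.Set.empty)).1
      = (PySem.Set.ofList sl).filter
          (fun k => decide (((PySem.List.count sl k : Nat) : Int) = n)) := by
  have hfirsts : pvFirsts PySem.Set.empty sl = PySem.Set.ofList sl := by
    have h := pvFirstsUpdate sl PySem.Set.empty
    rw [PySem.Set.ofList_eq_foldl]
    simpa [PySem.Set.empty] using h.symm
  rw [pvFoldFirst qual sl [] PySem.Set.empty, hfirsts, List.nil_append]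
  refine List.filter_congr ?_
  intro x hx
  have hxsl : x ∈ sl := (PySem.Set.mem_ofList sl x).1 hx
  rw [pvCount_eq]
  by_cases hcnt : ((sl.count x : Nat) : Int) = n
  · have hmem : x ∈ qual := (hq x).2 ⟨hxsl, hcnt⟩
    simp [PySem.Set.contains, hmem, hcnt]
  · have hmem : x ∉ qual := fun h => hcnt ((hq x).1 h).2
    simp [PySem.Set.contains, hmem, hcnt]

lemma pvB_eq_filter (sl : List String) (n : Int) :
    String_Solution_alt sl n
      = (PySem.Set.ofList sl).filter
          (fun k => decide (((PySem.List.count sl k : Nat) : Int) = n)) :=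
  pvB_main sl n (pvQual sl n) (pvQualMem sl n)

-- ===== VERDICT (by name: the statement is the Claim_ definition above) =====
theorem String_Solution_spec : Claim_equal_String_Solution := by
  intro sl n _
  unfold Spec_String_Solution
  rw [pvA_eq_filter, pvB_eq_filter]
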